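-- pv_equiv track=rewrite | github.com/JCvLeeuwen/Ijoid_phylogenetic_inference | ijoidwordlistextractor.py | has_lang_code
-- ===== SOURCE A (Python) =====
-- def has_lang_code(line, lang_codes):
--     words = line.strip().split()
--     for w in words:
--         if w in lang_codes:
--             return True
--         if any(m in w for m in ['Ịb', 'Kala', 'Nembe', 'Defaka']):
--             return True
--     return False
-- ===== SOURCE B (Python) =====
-- def has_lang_code(line, lang_codes):
--     stripped = line.strip()
--     if any(w in lang_codes for w in stripped.split()):
--         return True
--     return any(m in stripped for m in ['Ịb', 'Kala', 'Nembe', 'Defaka'])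
-- ===== Notes on version B (the rewrite author's own statement) =====
-- stated objective: simpler
-- what changed: A fuses the exact-match test and the marker-substring test into one per-word loop with early returns; B keeps the word loop only for the exact-match test and checks the four fixed markers against the whole stripped line in a separate whole-string scan (valid because the markers contain no whitespace).
import Mathlib
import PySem

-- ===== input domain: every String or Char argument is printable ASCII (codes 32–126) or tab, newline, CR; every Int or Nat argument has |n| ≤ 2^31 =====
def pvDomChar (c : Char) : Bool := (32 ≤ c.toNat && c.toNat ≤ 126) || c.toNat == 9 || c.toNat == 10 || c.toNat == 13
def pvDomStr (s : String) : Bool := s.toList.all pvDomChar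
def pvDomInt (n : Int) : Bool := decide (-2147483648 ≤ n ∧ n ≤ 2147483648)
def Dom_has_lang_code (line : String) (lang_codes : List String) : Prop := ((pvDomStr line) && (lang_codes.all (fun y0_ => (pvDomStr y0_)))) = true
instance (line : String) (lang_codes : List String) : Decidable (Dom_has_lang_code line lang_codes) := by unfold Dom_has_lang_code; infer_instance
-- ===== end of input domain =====

-- B replaces A's fused per-word marker scan by a separate whole-string marker scan over the
-- stripped line (markers are whitespace-free, so a per-word hit equals a whole-line hit); objective: simpler.

-- ===== PORT A =====
-- the fixed marker list of the Python source
def pvMarkers : List String := ["Ịb", "Kala", "Nembe", "Defaka"]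

-- A's for-loop over the words, with its two early returns in order
def pvALoop (lang_codes : List String) : List String → Bool
  | [] => false
  | w :: ws =>
    if lang_codes.contains w then true
    else if pvMarkers.any (fun m => PySem.Str.isIn m w) then true
    else pvALoop lang_codes ws

def has_lang_code (line : String) (lang_codes : List String) : Bool :=
  pvALoop lang_codes (PySem.Str.split₀ (PySem.Str.strip line))

-- ===== PORT B =====
def has_lang_code_alt (line : String) (lang_codes : List String) : Bool :=
  let stripped := PySem.Str.strip line
  if (PySem.Str.split₀ stripped).any (fun w => lang_codes.contains w) then true
  else pvMarkers.any (fun m => PySem.Str.isIn m stripped)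

-- ===== PRECONDITION & SPEC =====
def Spec_has_lang_code (line : String) (lang_codes : List String) (out : Bool) : Prop := out = has_lang_code_alt line lang_codes
instance (line : String) (lang_codes : List String) (out : Bool) : Decidable (Spec_has_lang_code line lang_codes out) := by unfold Spec_has_lang_code; infer_instance

-- ===== CLAIM (what is proved, stated in full; the proofs are below) =====
def Claim_equal_has_lang_code : Prop := ∀ (line : String) (lang_codes : List String), Dom_has_lang_code line lang_codes → Spec_has_lang_code line lang_codes (has_lang_code line lang_codes)

-- ===== LEMMAS AND PROOFS =====

-- An occurrence of a pattern that does not contain c cannot cross the c in a ++ c :: b.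
lemma pv_infix_append_cons {m : List Char} {c : Char} (hc : c ∉ m)
    (a b : List Char) : m <:+: (a ++ c :: b) ↔ m <:+: a ∨ m <:+: b := by
  constructor
  · rintro ⟨t, u, htu⟩
    by_cases h1 : t.length + m.length ≤ a.length
    · left
      have e1 : (a ++ c :: b).take (t ++ m).length = (t ++ m ++ u).take (t ++ m).length := by rw [htu]
      rw [List.take_append_of_le_length (by simp; omega), List.take_left] at e1
      have e5 := List.take_append_drop (t ++ m).length a
      rw [e1] at e5
      exact ⟨t, a.drop (t ++ m).length, e5⟩
    · by_cases h2 : a.length + 1 ≤ t.length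
      · right
        have hd : (a ++ c :: b).drop t.length = m ++ u := by
          rw [← htu, List.append_assoc, List.drop_left]
        have hd2 : b.drop (t.length - (a.length + 1)) = m ++ u := by
          rw [← hd]
          have e3 : a ++ c :: b = (a ++ [c]) ++ b := by simp
          have e4 : t.length = (a ++ [c]).length + (t.length - (a.length + 1)) := by simp; omega
          rw [e3, e4, List.drop_length_add_append]
          simp
        exact ⟨b.take (t.length - (a.length + 1)), u, by
          rw [List.append_assoc, ← hd2, List.take_append_drop]⟩
      · exfalso
        apply hc
        have e1 : (a ++ c :: b)[a.length]? = some c := by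
          rw [List.getElem?_append_right (le_refl _)]; simp
        rw [← htu] at e1
        rw [List.getElem?_append_left (by simp; omega),
            List.getElem?_append_right (by omega)] at e1
        exact List.mem_of_getElem? e1
  · rintro (h | h)
    · exact h.trans (a.prefix_append (c :: b)).isInfix
    · exact h.trans ((List.suffix_cons c b).trans (List.suffix_append a (c :: b))).isInfix

lemma pv_go_infix {m : List Char} (hm : m ≠ [])
    (hms : ∀ c ∈ m, PySem.Chars.isspace c = false) :
    ∀ (s cur acc : _), (∃ w ∈ PySem.Chars.split₀.go s cur acc, m <:+: w) ↔
      ((∃ w ∈ acc, m <:+: w) ∨ m <:+: (cur.reverse ++ s)) := by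
  intro s
  induction s with
  | nil =>
    intro cur acc
    simp only [PySem.Chars.split₀.go]
    by_cases hcur : cur = []
    · simp [hcur, List.infix_nil, hm]
    · simp [List.isEmpty_iff, hcur]
      aesop
  | cons c rest ih =>
    intro cur acc
    simp only [PySem.Chars.split₀.go]
    by_cases hsp : PySem.Chars.isspace c = true
    · have hcnm : c ∉ m := fun h => by simp [hms c h] at hsp
      rw [pv_infix_append_cons hcnm cur.reverse rest]
      by_cases hcur : cur = []
      · simp only [hsp, if_true, hcur, List.isEmpty_nil, List.reverse_nil]
        rw [ih [] acc]
        simp [List.infix_nil, hm]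
      · simp only [hsp, if_true, List.isEmpty_iff, hcur, if_false]
        rw [ih [] (cur.reverse :: acc)]
        simp
        aesop
    · simp only [Bool.not_eq_true] at hsp
      simp only [hsp, Bool.false_eq_true, if_false]
      rw [ih (c :: cur) acc]
      simp [List.append_assoc]

-- For a nonempty whitespace-free pattern, a per-word substring hit equals a whole-string hit.
lemma pv_split_any_isIn {m : List Char} (hm : m ≠ [])
    (hms : ∀ c ∈ m, PySem.Chars.isspace c = false) (s : List Char) :
    (PySem.Chars.split₀ s).any (fun w => PySem.Chars.isIn m w) = PySem.Chars.isIn m s := by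
  rw [Bool.eq_iff_iff]
  simp only [List.any_eq_true, PySem.Chars.isIn_iff_infix]
  simpa using pv_go_infix hm hms s [] []

-- A's loop written as the disjunction of its two tests over the word list
lemma pv_aLoop_eq (lang_codes : List String) (ws : List String) :
    pvALoop lang_codes ws =
      (ws.any (fun w => lang_codes.contains w) ||
       ws.any (fun w => pvMarkers.any (fun m => PySem.Str.isIn m w))) := by
  induction ws with
  | nil => simp [pvALoop]
  | cons w ws ih =>
    simp only [pvALoop, List.any_cons, ih]
    cases h1 : lang_codes.contains w <;>
      cases h2 : pvMarkers.any (fun m => PySem.Str.isIn m w) <;>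
        simp

-- the marker test swapped to scan the whole stripped string once per marker
lemma pv_markers_swap (t : String) :
    (PySem.Str.split₀ t).any (fun w => pvMarkers.any (fun m => PySem.Str.isIn m w)) =
      pvMarkers.any (fun m => PySem.Str.isIn m t) := by
  have key : ∀ m ∈ pvMarkers,
      (PySem.Str.split₀ t).any (fun w => PySem.Str.isIn m w) = PySem.Str.isIn m t := by
    intro m hmem
    have hm : m.toList ≠ [] ∧ ∀ c ∈ m.toList, PySem.Chars.isspace c = false := by
      have e1 : "Ịb".toList = ['Ị', 'b'] := by simp
      have e2 : "Kala".toList = ['K', 'a', 'l', 'a'] := by simp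
      have e3 : "Nembe".toList = ['N', 'e', 'm', 'b', 'e'] := by simp
      have e4 : "Defaka".toList = ['D', 'e', 'f', 'a', 'k', 'a'] := by simp
      simp only [pvMarkers, List.mem_cons, List.not_mem_nil, or_false] at hmem
      rcases hmem with rfl | rfl | rfl | rfl <;> simp only [e1, e2, e3, e4] <;>
        exact ⟨by simp, by intro c hc; fin_cases hc <;> decide⟩
    have h1 : ∀ w, PySem.Str.isIn m w = PySem.Chars.isIn m.toList w.toList :=
      fun w => PySem.Str.isIn_eq m w
    simp only [h1]
    rw [← pv_split_any_isIn hm.1 hm.2 t.toList, ← PySem.Str.split₀_map_toList, List.any_map]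
    rfl
  rw [Bool.eq_iff_iff]
  simp only [List.any_eq_true]
  constructor
  · rintro ⟨w, hw, m, hmem, hin⟩
    exact ⟨m, hmem, by rw [← key m hmem]; exact List.any_eq_true.mpr ⟨w, hw, hin⟩⟩
  · rintro ⟨m, hmem, hin⟩
    rw [← key m hmem] at hin
    obtain ⟨w, hw, h⟩ := List.any_eq_true.mp hin
    exact ⟨w, hw, m, hmem, h⟩

-- ===== VERDICT (by name: the statement is the Claim_ definition above) =====
theorem has_lang_code_spec : Claim_equal_has_lang_code := by
  intro line lang_codes _
  unfold Spec_has_lang_code has_lang_code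
  simp only [has_lang_code_alt]
  rw [pv_aLoop_eq, pv_markers_swap]
  cases h : (PySem.Str.split₀ (PySem.Str.strip line)).any (fun w => lang_codes.contains w) <;>
    simp_all
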